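-- pv_equiv track=rewrite | github.com/QUAFFquaff/OBDDetect | OBD_project-master/dataHandler/Algorithm_comparision/COP-Kmeans-master/COP_Kmeans.py | word2vector
-- ===== SOURCE A (Python) =====
-- normal_events = ['a', 'b', 'c', 'd']
--
-- medium_events = ['m', 'n', 'o', 'p']
--
-- high_events = ['w', 'x', 'y', 'z']
--
-- def word2vector(word):
--     x0, x1, x2 = 0, 0, 0
--     for l in word:
--         if l in normal_events:
--             x0 += 1
--         elif l in medium_events:
--             x1 += 10
--         elif l in high_events:
--             x2 += 20
--     return [x0, x1, x2, len(word)]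
-- ===== SOURCE B (Python) =====
-- normal_events = ['a', 'b', 'c', 'd']
--
-- medium_events = ['m', 'n', 'o', 'p']
--
-- high_events = ['w', 'x', 'y', 'z']
--
-- def word2vector(word):
--     cnt = {}
--     for l in word:
--         cnt[l] = cnt.get(l, 0) + 1
--     x0 = sum(cnt.get(c, 0) for c in normal_events)
--     x1 = 10 * sum(cnt.get(c, 0) for c in medium_events)
--     x2 = 20 * sum(cnt.get(c, 0) for c in high_events)
--     return [x0, x1, x2, len(word)]
-- ===== Notes on version B (the rewrite author's own statement) =====
-- stated objective: idiomatic
-- what changed: B builds a character-frequency table in one pass and then aggregates it per category list (tabulate-then-aggregate), instead of A's per-character three-way branching scan with three running accumulators.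
import Mathlib
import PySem

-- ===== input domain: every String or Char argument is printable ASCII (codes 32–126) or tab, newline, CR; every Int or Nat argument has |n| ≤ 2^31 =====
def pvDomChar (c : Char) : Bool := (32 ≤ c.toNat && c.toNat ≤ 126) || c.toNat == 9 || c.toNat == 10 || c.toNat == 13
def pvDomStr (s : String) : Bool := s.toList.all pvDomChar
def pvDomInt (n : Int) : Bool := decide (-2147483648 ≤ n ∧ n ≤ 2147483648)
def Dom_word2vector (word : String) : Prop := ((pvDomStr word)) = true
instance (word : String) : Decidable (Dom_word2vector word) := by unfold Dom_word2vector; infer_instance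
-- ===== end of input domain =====

-- B tabulates character frequencies once (a Counter-style dict) and aggregates per category list, instead of A's per-character three-way branching scan.


def normalEvents : List Char := ['a', 'b', 'c', 'd']
def mediumEvents : List Char := ['m', 'n', 'o', 'p']
def highEvents : List Char := ['w', 'x', 'y', 'z']

-- ===== PORT A =====
-- the loop body of A: three accumulators, three-way branch in the same order
def w2vStep (s : Int × Int × Int) (l : Char) : Int × Int × Int :=
  if normalEvents.contains l then (s.1 + 1, s.2.1, s.2.2)
  else if mediumEvents.contains l then (s.1, s.2.1 + 10, s.2.2)
  else if highEvents.contains l then (s.1, s.2.1, s.2.2 + 20)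
  else s

def word2vector (word : String) : List Int :=
  let s := word.toList.foldl w2vStep (0, 0, 0)
  [s.1, s.2.1, s.2.2, PySem.Str.len word]

-- ===== PORT B =====
def word2vector_alt (word : String) : List Int :=
  let cnt := word.toList.foldl (fun (d : PySem.Dict Char Int) l => d.insert l (d.getD l 0 + 1)) PySem.Dict.empty
  let x0 := (normalEvents.map (fun c => cnt.getD c 0)).sum
  let x1 := 10 * (mediumEvents.map (fun c => cnt.getD c 0)).sum
  let x2 := 20 * (highEvents.map (fun c => cnt.getD c 0)).sum
  [x0, x1, x2, PySem.Str.len word]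

-- ===== PRECONDITION & SPEC =====
def Spec_word2vector (word : String) (out : List Int) : Prop := out = word2vector_alt word
instance (word : String) (out : List Int) : Decidable (Spec_word2vector word out) := by unfold Spec_word2vector; infer_instance

-- ===== CLAIM (what is proved, stated in full; the proofs are below) =====
def Claim_equal_word2vector : Prop := ∀ (word : String), Dom_word2vector word → Spec_word2vector word (word2vector word)

-- ===== LEMMAS AND PROOFS =====
theorem w2v_fold (l : List Char) (a b c : Int) :
    l.foldl w2vStep (a, b, c) =
      (a + (l.count 'a' + l.count 'b' + l.count 'c' + l.count 'd' : Nat),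
       b + 10 * (l.count 'm' + l.count 'n' + l.count 'o' + l.count 'p' : Nat),
       c + 20 * (l.count 'w' + l.count 'x' + l.count 'y' + l.count 'z' : Nat)) := by
  induction l generalizing a b c with
  | nil => simp
  | cons x xs ih =>
    simp only [List.foldl_cons, w2vStep, normalEvents, mediumEvents, highEvents]
    split_ifs with h1 h2 h3 <;>
      simp only [List.contains_eq_mem, List.mem_cons, List.not_mem_nil, or_false, decide_eq_true_eq, not_or] at h1 <;>
      [skip; simp only [List.contains_eq_mem, List.mem_cons, List.not_mem_nil, or_false,
        decide_eq_true_eq, not_or] at h2; (simp only [List.contains_eq_mem, List.mem_cons,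
        List.not_mem_nil, or_false, decide_eq_true_eq, not_or] at h2 h3);
        (simp only [List.contains_eq_mem, List.mem_cons, List.not_mem_nil, or_false,
        decide_eq_true_eq, not_or] at h2 h3)] <;>
    first
    | (rcases h1 with h | h | h | h <;> subst h <;>
        simp [ih] <;> ring)
    | (rcases h2 with h | h | h | h <;> subst h <;>
        simp [ih, h1.1, h1.2.1, h1.2.2.1, h1.2.2.2] <;> ring)
    | (rcases h3 with h | h | h | h <;> subst h <;>
        simp [ih, h1.1, h1.2.1, h1.2.2.1, h1.2.2.2,
          h2.1, h2.2.1, h2.2.2.1, h2.2.2.2] <;> ring)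
    | (simp [ih, h1.1, h1.2.1, h1.2.2.1, h1.2.2.2,
          h2.1, h2.2.1, h2.2.2.1, h2.2.2.2,
          h3.1, h3.2.1, h3.2.2.1, h3.2.2.2])

-- ===== VERDICT (by name: the statement is the Claim_ definition above) =====
theorem word2vector_spec : Claim_equal_word2vector := by
  intro word _
  unfold Spec_word2vector word2vector word2vector_alt
  simp only [List.map_cons, List.map_nil, PySem.Dict.getD_foldl_insert_add_one,
    PySem.Dict.getD_empty, List.sum_cons, List.sum_nil, w2v_fold, normalEvents, mediumEvents,
    highEvents]
  push_cast
  refine List.ext_getElem (by simp) ?_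
  intro i h1 h2
  simp only [List.length_cons, List.length_nil] at h1
  interval_cases i <;> simp <;> ring
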